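-- pv_equiv track=rewrite | github.com/YellowThree-HS/DSP_LAB | lec2/lec2_01.py | vad
-- ===== SOURCE A (Python) =====
-- def vad(audio, energy, threshold):
--     # 计算音频文件的起始和结束位置
--     start = 0
--     while start < len(energy) and energy[start] < threshold:
--         start += 1
--     end = len(energy) - 1
--     while end >= 0 and energy[end] < threshold:
--         end -= 1
--     return start, end
-- ===== SOURCE B (Python) =====
-- def vad(audio, energy, threshold):
--     # One forward pass: collect qualifying indices, then pick the endpoints.
--     hits = [i for i, e in enumerate(energy) if not e < threshold]
--     start = hits[0] if hits else len(energy)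
--     end = hits[-1] if hits else -1
--     return start, end
-- ===== Notes on version B (the rewrite author's own statement) =====
-- stated objective: simpler
-- what changed: Replaces the two end-anchored while-loop scans with a single forward pass that collects all qualifying indices and then selects the first and last (with len(energy)/-1 defaults when none qualify).
import Mathlib
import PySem

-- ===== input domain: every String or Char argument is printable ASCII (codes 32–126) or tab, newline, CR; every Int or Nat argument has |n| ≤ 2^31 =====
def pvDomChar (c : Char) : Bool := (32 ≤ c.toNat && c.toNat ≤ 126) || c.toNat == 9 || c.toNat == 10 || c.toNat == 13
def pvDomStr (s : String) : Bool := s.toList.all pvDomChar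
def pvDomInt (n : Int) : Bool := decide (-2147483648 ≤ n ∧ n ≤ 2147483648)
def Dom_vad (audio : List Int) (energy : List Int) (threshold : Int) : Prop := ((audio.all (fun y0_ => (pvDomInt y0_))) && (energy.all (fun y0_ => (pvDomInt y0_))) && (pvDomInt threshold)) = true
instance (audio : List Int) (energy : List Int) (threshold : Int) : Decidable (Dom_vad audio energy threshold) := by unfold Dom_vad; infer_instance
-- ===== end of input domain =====

-- B replaces A's two end-anchored while-loop scans by one forward pass collecting the
-- qualifying indices and then selecting the first and last (objective: simpler).

-- ===== PORT A =====
-- while start < len(energy) and energy[start] < threshold: start += 1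
def vadStartLoop (energy : List Int) (threshold : Int) (start : Nat) : Nat :=
  if _h : start < energy.length ∧ energy.getD start 0 < threshold then
    vadStartLoop energy threshold (start + 1)
  else start
termination_by energy.length - start
decreasing_by omega

-- while end >= 0 and energy[end] < threshold: end -= 1   (end starts in range, so getD is exact)
def vadEndLoop (energy : List Int) (threshold : Int) (e : Int) : Int :=
  if _h : 0 ≤ e ∧ energy.getD e.toNat 0 < threshold then
    vadEndLoop energy threshold (e - 1)
  else e
termination_by (e + 1).toNat
decreasing_by omega

def vad (audio : List Int) (energy : List Int) (threshold : Int) : Int × Int :=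
  (vadStartLoop energy threshold 0, vadEndLoop energy threshold ((energy.length : Int) - 1))

-- ===== PORT B =====
-- hits = [i for i, e in enumerate(energy) if not e < threshold]
def vadHits (energy : List Int) (threshold : Int) : List Int :=
  (PySem.List.enumerate energy).filterMap (fun p => if ¬ p.2 < threshold then some p.1 else none)

def vad_alt (audio : List Int) (energy : List Int) (threshold : Int) : Int × Int :=
  let hits := vadHits energy threshold
  ((match hits.head? with | some i => i | none => (energy.length : Int)),
   (match hits.getLast? with | some i => i | none => -1))

-- ===== PRECONDITION & SPEC =====
def Spec_vad (audio : List Int) (energy : List Int) (threshold : Int) (out : Int × Int) : Prop := out = vad_alt audio energy threshold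
instance (audio : List Int) (energy : List Int) (threshold : Int) (out : Int × Int) : Decidable (Spec_vad audio energy threshold out) := by unfold Spec_vad; infer_instance

-- ===== CLAIM (what is proved, stated in full; the proofs are below) =====
def Claim_equal_vad : Prop := ∀ (audio : List Int) (energy : List Int) (threshold : Int), Dom_vad audio energy threshold → Spec_vad audio energy threshold (vad audio energy threshold)

-- ===== LEMMAS AND PROOFS =====

-- hits of a suffix, with the matching start offset
def hitsFrom (threshold : Int) (s : Int) (l : List Int) : List Int :=
  (PySem.List.enumerate l s).filterMap (fun p => if ¬ p.2 < threshold then some p.1 else none)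

theorem hitsFrom_nil (threshold s : Int) : hitsFrom threshold s [] = [] := rfl

theorem hitsFrom_cons (threshold s : Int) (a : Int) (l : List Int) :
    hitsFrom threshold s (a :: l) =
      (if ¬ a < threshold then [s] else []) ++ hitsFrom threshold (s + 1) l := by
  simp only [hitsFrom, PySem.List.enumerate_cons, List.filterMap_cons]
  by_cases h : a < threshold <;> simp [h]

theorem hitsFrom_append (threshold s : Int) (l₁ l₂ : List Int) :
    hitsFrom threshold s (l₁ ++ l₂) =
      hitsFrom threshold s l₁ ++ hitsFrom threshold (s + l₁.length) l₂ := by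
  simp [hitsFrom, PySem.List.enumerate_append]

theorem vadStartLoop_eq (energy : List Int) (threshold : Int) :
    ∀ (n s : Nat), energy.length - s = n → s ≤ energy.length →
    vadStartLoop energy threshold s =
      (match (hitsFrom threshold (s : Int) (energy.drop s)).head? with
        | some i => i.toNat | none => energy.length) := by
  intro n
  induction n with
  | zero =>
    intro s hn hs
    have hlen : s = energy.length := by omega
    rw [vadStartLoop]
    simp [hlen, hitsFrom_nil]
  | succ n ih =>
    intro s hn hs
    have hlt : s < energy.length := by omega
    have hdrop : energy.drop s = energy[s] :: energy.drop (s + 1) :=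
      List.drop_eq_getElem_cons hlt
    have hgetD : energy.getD s 0 = energy[s] := List.getD_eq_getElem energy 0 hlt
    rw [vadStartLoop, hdrop, hitsFrom_cons]
    by_cases hc : energy[s] < threshold
    · have : s < energy.length ∧ energy.getD s 0 < threshold := ⟨hlt, by rw [hgetD]; exact hc⟩
      rw [dif_pos this]
      have := ih (s + 1) (by omega) (by omega)
      rw [this]
      simp only [hc]
      norm_cast
    · have : ¬ (s < energy.length ∧ energy.getD s 0 < threshold) := by
        rw [hgetD]; tauto
      rw [dif_neg this]
      simp [hc]

theorem vadEndLoop_eq (energy : List Int) (threshold : Int) :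
    ∀ (n : Nat), n ≤ energy.length →
    vadEndLoop energy threshold ((n : Int) - 1) =
      (match (hitsFrom threshold 0 (energy.take n)).getLast? with
        | some i => i | none => -1) := by
  intro n
  induction n with
  | zero =>
    intro _
    rw [vadEndLoop]
    simp [hitsFrom_nil]
  | succ n ih =>
    intro hs
    have hlt : n < energy.length := by omega
    have htake : energy.take (n + 1) = energy.take n ++ [energy[n]] := by
      rw [List.take_add_one]; simp [List.getElem?_eq_getElem hlt]
    have hlen : (energy.take n).length = n := by simp; omega
    rw [htake, hitsFrom_append, hlen]
    have hgetD : energy.getD ((n : Int)).toNat 0 = energy[n] := by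
      simp [List.getD, List.getElem?_eq_getElem hlt]
    have he : ((n + 1 : Nat) : Int) - 1 = (n : Int) := by push_cast; ring
    rw [vadEndLoop, he]
    by_cases hc : energy[n] < threshold
    · have hcond : 0 ≤ (n : Int) ∧ energy.getD (n : Int).toNat 0 < threshold :=
        ⟨Int.natCast_nonneg n, by rw [hgetD]; exact hc⟩
      rw [dif_pos hcond, ih (by omega)]
      simp [hitsFrom_cons, hitsFrom_nil, hc]
    · have hcond : ¬ (0 ≤ (n : Int) ∧ energy.getD (n : Int).toNat 0 < threshold) :=
        fun h => hc (hgetD ▸ h.2)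
      rw [dif_neg hcond]
      simp [hitsFrom_cons, hitsFrom_nil, hc]

theorem hitsFrom_nonneg (threshold : Int) :
    ∀ (l : List Int) (s : Int), 0 ≤ s → ∀ i ∈ hitsFrom threshold s l, 0 ≤ i := by
  intro l
  induction l with
  | nil => intro s _ i hi; simp [hitsFrom_nil] at hi
  | cons a l ih =>
    intro s hs i hi
    rw [hitsFrom_cons] at hi
    rcases List.mem_append.mp hi with h | h
    · split_ifs at h <;> simp at h; omega
    · exact ih (s + 1) (by omega) i h

-- ===== VERDICT (by name: the statement is the Claim_ definition above) =====
theorem vad_spec : Claim_equal_vad := by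
  intro audio energy threshold _
  unfold Spec_vad vad vad_alt
  have hhits : vadHits energy threshold = hitsFrom threshold 0 energy := rfl
  have hstart := vadStartLoop_eq energy threshold energy.length 0 (by omega) (by omega)
  have hend := vadEndLoop_eq energy threshold energy.length le_rfl
  simp only [List.drop_zero, Int.natCast_zero] at hstart
  simp only [List.take_length] at hend
  rw [hhits]
  refine Prod.ext ?_ ?_
  · simp only [hstart]
    cases hh : (hitsFrom threshold 0 energy).head? with
    | none => simp
    | some i =>
      have hi : 0 ≤ i :=
        hitsFrom_nonneg threshold energy 0 le_rfl i (List.mem_of_mem_head? hh)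
      simp [Int.toNat_of_nonneg hi]
  · simpa using hend
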